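-- pv_equiv track=rewrite | github.com/3LENDERMAN/Python_projects | 02/digit_sum.py | to_seven_base
-- ===== SOURCE A (Python) =====
-- def to_seven_base(number):
--     if number == 0:
--         return 0
--     value = 0
--     power = 1
--     while number > 0:
--         value += number % 7 * power
--         number //= 7
--         power *= 10
--
--     return value
-- ===== SOURCE B (Python) =====
-- def to_seven_base(number):
--     if number <= 0:
--         return 0
--     return to_seven_base(number // 7) * 10 + number % 7
-- ===== Notes on version B (the rewrite author's own statement) =====
-- stated objective: simpler
-- what changed: Replaces the iterative loop with an explicit value accumulator and power-of-ten multiplier by a direct recursion on number // 7 that assembles the digits on the way back up.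
import Mathlib
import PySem

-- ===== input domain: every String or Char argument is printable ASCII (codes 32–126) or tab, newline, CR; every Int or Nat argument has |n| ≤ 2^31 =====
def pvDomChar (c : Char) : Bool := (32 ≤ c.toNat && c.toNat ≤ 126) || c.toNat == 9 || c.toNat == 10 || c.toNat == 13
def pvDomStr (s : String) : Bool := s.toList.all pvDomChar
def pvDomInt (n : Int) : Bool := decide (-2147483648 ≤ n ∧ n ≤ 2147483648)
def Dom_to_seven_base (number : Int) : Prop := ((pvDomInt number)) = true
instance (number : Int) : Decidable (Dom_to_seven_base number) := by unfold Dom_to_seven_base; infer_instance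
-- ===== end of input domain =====

-- B replaces A's iterative accumulator/power-of-ten loop by a direct recursion on number // 7 (simpler).


-- ===== PORT A =====
-- while number > 0: value += number % 7 * power; number //= 7; power *= 10
def to_seven_base_loop (number value power : Int) : Int :=
  if h : number > 0 then
    to_seven_base_loop (PySem.Int.floordiv number 7) (value + PySem.Int.mod number 7 * power) (power * 10)
  else value
termination_by number.toNat
decreasing_by
  have h7 : PySem.Int.floordiv number 7 = number / 7 :=
    PySem.Int.floordiv_eq_ediv_of_pos (by omega)
  rw [h7]; omega

def to_seven_base (number : Int) : Int :=
  if number = 0 then 0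
  else to_seven_base_loop number 0 1

-- ===== PORT B =====
def to_seven_base_alt (number : Int) : Int :=
  if h : number ≤ 0 then 0
  else to_seven_base_alt (PySem.Int.floordiv number 7) * 10 + PySem.Int.mod number 7
termination_by number.toNat
decreasing_by
  have h7 : PySem.Int.floordiv number 7 = number / 7 :=
    PySem.Int.floordiv_eq_ediv_of_pos (by omega)
  rw [h7]; omega

-- ===== PRECONDITION & SPEC =====
def Spec_to_seven_base (number : Int) (out : Int) : Prop := out = to_seven_base_alt number
instance (number : Int) (out : Int) : Decidable (Spec_to_seven_base number out) := by unfold Spec_to_seven_base; infer_instance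

-- ===== CLAIM (what is proved, stated in full; the proofs are below) =====
def Claim_equal_to_seven_base : Prop := ∀ (number : Int), Dom_to_seven_base number → Spec_to_seven_base number (to_seven_base number)

-- ===== LEMMAS AND PROOFS =====
theorem to_seven_base_loop_eq (number value power : Int) :
    to_seven_base_loop number value power = to_seven_base_alt number * power + value := by
  induction number, value, power using to_seven_base_loop.induct with
  | case1 number value power h ih =>
      rw [to_seven_base_loop, to_seven_base_alt]
      simp only [dif_pos h, dif_neg (by omega : ¬ number ≤ 0)]
      rw [ih]; ring
  | case2 number value power h =>
      rw [to_seven_base_loop, to_seven_base_alt]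
      simp only [dif_neg h, dif_pos (by omega : number ≤ 0)]
      ring

-- ===== VERDICT (by name: the statement is the Claim_ definition above) =====
theorem to_seven_base_spec : Claim_equal_to_seven_base := by
  intro number _
  unfold Spec_to_seven_base to_seven_base
  split_ifs with h
  · subst h; rw [to_seven_base_alt]; simp
  · rw [to_seven_base_loop_eq]; ring
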